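-- pv_equiv track=rewrite | github.com/SillySerpent/Repograph | repograph/plugins/exporters/modules/plugin.py | _group_files_with_expansion
-- ===== SOURCE A (Python) =====
-- from collections import defaultdict
--
-- _MAX_MODULE_DEPTH = 3
--
-- def _key_at_depth(file_path: str, depth: int) -> str:
--     """Directory prefix with ``depth`` segments (parent dir of file)."""
--     parts = file_path.replace("\\", "/").split("/")
--     if len(parts) == 1:
--         return "__root__"
--     dir_parts = parts[:-1]
--     if not dir_parts:
--         return "__root__"
--     take = min(depth, len(dir_parts))
--     return "/".join(dir_parts[:take])
--
-- def _group_files_with_expansion(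
--     all_files: list[dict],
--     threshold: int,
-- ) -> dict[str, list[dict]]:
--     """Group files by module directory; expand crowded groups up to ``_MAX_MODULE_DEPTH``."""
--     if not all_files:
--         return {}
--     groups: dict[str, list[dict]] = defaultdict(list)
--     for f in all_files:
--         groups[_key_at_depth(f["path"], 1)].append(f)
--
--     depth = 1
--     while depth < _MAX_MODULE_DEPTH:
--         oversized = [
--             k for k, fs in groups.items()
--             if k != "__root__" and len(fs) > threshold
--         ]
--         if not oversized:
--             break
--         new_groups: dict[str, list[dict]] = defaultdict(list)
--         for k, fs in groups.items():
--             if k in oversized: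
--                 for f in fs:
--                     new_groups[_key_at_depth(f["path"], depth + 1)].append(f)
--             else:
--                 new_groups[k].extend(fs)
--         groups = new_groups
--         depth += 1
--
--     return dict(groups)
-- ===== SOURCE B (Python) =====
-- _MAX_MODULE_DEPTH = 3
--
-- def _key_at_depth(file_path: str, depth: int) -> str:
--     """Directory prefix with ``depth`` segments (parent dir of file)."""
--     parts = file_path.replace("\\", "/").split("/")
--     if len(parts) == 1:
--         return "__root__"
--     dir_parts = parts[:-1]
--     if not dir_parts:
--         return "__root__"
--     take = min(depth, len(dir_parts))
--     return "/".join(dir_parts[:take])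
--
-- def _split(key, files, depth, threshold):
--     """Divide-and-conquer: expand one group recursively along the prefix hierarchy."""
--     if key == "__root__" or len(files) <= threshold or depth >= _MAX_MODULE_DEPTH:
--         return [(key, files)]
--     sub = {}
--     for f in files:
--         sub.setdefault(_key_at_depth(f["path"], depth + 1), []).append(f)
--     out = []
--     for k, g in sub.items():
--         out.extend(_split(k, g, depth + 1, threshold))
--     return out
--
-- def _group_files_with_expansion(all_files, threshold):
--     if not all_files:
--         return {}
--     top = {}
--     for f in all_files:
--         top.setdefault(_key_at_depth(f["path"], 1), []).append(f)
--     out = []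
--     for k, g in top.items():
--         out.extend(_split(k, g, 1, threshold))
--     return dict(out)
-- ===== Notes on version B (the rewrite author's own statement) =====
-- stated objective: alternative
-- what changed: Replaces A's iterative rounds (rescan the whole dict for oversized groups, rebuild the entire dict each round) with a recursive divide-and-conquer _split that expands each crowded group independently down the prefix hierarchy and concatenates the results.
import Mathlib
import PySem

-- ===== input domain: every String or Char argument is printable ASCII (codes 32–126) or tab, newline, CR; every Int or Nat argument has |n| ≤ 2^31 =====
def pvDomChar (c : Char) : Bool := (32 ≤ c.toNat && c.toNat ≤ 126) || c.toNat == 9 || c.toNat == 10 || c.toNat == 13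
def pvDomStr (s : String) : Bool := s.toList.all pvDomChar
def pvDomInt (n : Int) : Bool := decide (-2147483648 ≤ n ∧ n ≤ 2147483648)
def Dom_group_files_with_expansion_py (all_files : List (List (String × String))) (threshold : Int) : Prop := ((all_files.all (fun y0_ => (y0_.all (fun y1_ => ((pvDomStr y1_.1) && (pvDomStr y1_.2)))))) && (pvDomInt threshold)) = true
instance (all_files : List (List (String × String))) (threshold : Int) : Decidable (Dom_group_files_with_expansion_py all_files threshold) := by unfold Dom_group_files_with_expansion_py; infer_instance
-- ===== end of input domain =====

-- B is a divide-and-conquer re-implementation (recursive split of each crowded group down the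
-- prefix hierarchy) of A's iterative whole-dict expansion loop; same return value, same order.

-- ===== PORT A =====

-- shared module helper `_key_at_depth` (used by both Pythons)
def keyAtDepth (file_path : String) (depth : Int) : String :=
  let parts := (PySem.Str.split? (PySem.Str.replace file_path "\\" "/") "/").getD []  -- sep ≠ "" so never none
  if PySem.List.len parts == 1 then "__root__"
  else
    let dir_parts := PySem.List.slice parts none (some (-1))
    if dir_parts == [] then "__root__"
    else
      let take := min depth (PySem.List.len dir_parts)
      PySem.Str.join "/" (PySem.List.slice dir_parts none (some take))

-- f["path"]; the KeyError case is excluded by Pre_ (the default is never read there)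
def pyPath (f : List (String × String)) : String := (PySem.Dict.mk f).getD "path" ""

-- the `while depth < _MAX_MODULE_DEPTH` loop; fuel = 3 - depth ticks with the loop
def gfweLoop (threshold : Int) :
    Nat → Int → PySem.Dict String (List (List (String × String))) →
    PySem.Dict String (List (List (String × String)))
  | 0, _, groups => groups
  | fuel+1, depth, groups =>
    let oversized := (groups.items.filter
      (fun kfs => kfs.1 != "__root__" && decide (PySem.List.len kfs.2 > threshold))).map Prod.fst
    if oversized == [] then groups
    else
      gfweLoop threshold fuel (depth + 1)
        (groups.items.foldl (fun d kfs =>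
          if kfs.1 ∈ oversized then
            kfs.2.foldl (fun d f => d.modify (keyAtDepth (pyPath f) (depth + 1)) [] (· ++ [f])) d
          else d.modify kfs.1 [] (· ++ kfs.2)) PySem.Dict.empty)

def group_files_with_expansion_py (all_files : List (List (String × String))) (threshold : Int) :
    List (String × List (List (String × String))) :=
  if all_files == [] then []
  else
    (gfweLoop threshold 2 1
      (all_files.foldl (fun d f => d.modify (keyAtDepth (pyPath f) 1) [] (· ++ [f]))
        PySem.Dict.empty)).items

-- ===== PORT B =====

-- `sub.setdefault(key, []).append(f)` grouping loop of B
def gfweRegroup (files : List (List (String × String))) (depth : Int) :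
    PySem.Dict String (List (List (String × String))) :=
  files.foldl (fun d f => d.modify (keyAtDepth (pyPath f) depth) [] (· ++ [f])) PySem.Dict.empty

-- recursive `_split`; fuel only for termination (depth ≥ 3 stops before fuel runs out)
def gfweSplit (threshold : Int) :
    Nat → String → Int → List (List (String × String)) → List (String × List (List (String × String)))
  | 0, key, _, files => [(key, files)]
  | fuel+1, key, depth, files =>
    if key == "__root__" || decide (PySem.List.len files ≤ threshold) || decide (depth ≥ 3) then
      [(key, files)]
    else
      (gfweRegroup files (depth + 1)).items.foldl
        (fun out kg => out ++ gfweSplit threshold fuel kg.1 (depth + 1) kg.2) []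

def group_files_with_expansion_py_alt (all_files : List (List (String × String))) (threshold : Int) :
    List (String × List (List (String × String))) :=
  if all_files == [] then []
  else
    (((gfweRegroup all_files 1).items.foldl
        (fun out kg => out ++ gfweSplit threshold 3 kg.1 1 kg.2) []).foldl
      (fun d kg => d.insert kg.1 kg.2) PySem.Dict.empty).items


-- ===== PRECONDITION & SPEC =====

-- Pre_ excludes exactly the files without a "path" key, on which A raises KeyError.
def Pre_group_files_with_expansion_py (all_files : List (List (String × String))) (threshold : Int) : Prop :=
  ∀ f ∈ all_files, ∃ kv ∈ f, kv.1 = "path"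
instance (all_files : List (List (String × String))) (threshold : Int) : Decidable (Pre_group_files_with_expansion_py all_files threshold) := by unfold Pre_group_files_with_expansion_py; infer_instance

def pvWitness_group_files_with_expansion_py : (List (List (String × String))) × Int :=
  ([[("path", "a/b/c.py")], [("path", "a/d.py")], [("path", "top.py")]], 1)

def Spec_group_files_with_expansion_py (all_files : List (List (String × String))) (threshold : Int) (out : List (String × List (List (String × String)))) : Prop := out = group_files_with_expansion_py_alt all_files threshold
instance (all_files : List (List (String × String))) (threshold : Int) (out : List (String × List (List (String × String)))) : Decidable (Spec_group_files_with_expansion_py all_files threshold out) := by unfold Spec_group_files_with_expansion_py; infer_instance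

-- ===== CLAIM (what is proved, stated in full; the proofs are below) =====
def Claim_equal_group_files_with_expansion_py : Prop := ∀ (all_files : List (List (String × String))) (threshold : Int), Dom_group_files_with_expansion_py all_files threshold → Pre_group_files_with_expansion_py all_files threshold → Spec_group_files_with_expansion_py all_files threshold (group_files_with_expansion_py all_files threshold)

-- ===== LEMMAS AND PROOFS =====
-- ---------- string layer ----------

theorem splitOn_eq_splitOnP (cs : List Char) :
    cs.splitOn '/' = cs.splitOnP (· == '/') := rfl

theorem pysplit_go (fuel : Nat) : ∀ (l cur : List Char) (acc : List (List Char)), l.length < fuel →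
    PySem.Chars.splitOn.go ['/'] fuel l cur acc
      = acc.reverse ++ (List.splitOnP (· == '/') l).modifyHead (cur.reverse ++ ·) := by
  induction fuel with
  | zero => intro l cur acc h; omega
  | succ n ih =>
    intro l cur acc h
    cases l with
    | nil =>
      simp [PySem.Chars.splitOn.go, List.splitOnP_nil]
    | cons c rest =>
      rw [PySem.Chars.splitOn.go.eq_def]
      by_cases hc : c = '/'
      · subst hc
        have hpre : List.isPrefixOf ['/'] ('/' :: rest) = true := by
          simp [List.isPrefixOf]
        simp only [hpre, if_pos]
        have hdrop : List.drop ['/'].length ('/' :: rest) = rest := rfl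
        rw [hdrop, ih rest [] (List.reverse cur :: acc) (by simpa using Nat.lt_of_succ_lt_succ h)]
        simp only [List.splitOnP_cons, beq_self_eq_true, if_pos, List.reverse_cons,
          List.reverse_nil, List.nil_append, List.modifyHead_cons, List.append_assoc,
          List.singleton_append]
        cases List.splitOnP (fun x => x == '/') rest <;> simp
      · have hpre : List.isPrefixOf ['/'] (c :: rest) = false := by
          simp only [List.isPrefixOf, Bool.and_eq_false_iff]
          left
          simpa using fun h' => absurd h'.symm hc
        simp only [hpre, Bool.false_eq_true, reduceIte]
        rw [ih rest (c :: cur) acc (by simpa using Nat.lt_of_succ_lt_succ h)]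
        rw [List.splitOnP_cons, if_neg (by simp [hc])]
        rw [List.modifyHead_modifyHead]
        have hfun : ((fun x => cur.reverse ++ x) ∘ List.cons c)
            = (fun x => (c :: cur).reverse ++ x) := by
          funext x; simp
        rw [hfun]

theorem pysplit (cs : List Char) : PySem.Chars.splitOn cs ['/'] = cs.splitOn '/' := by
  rw [PySem.Chars.splitOn, pysplit_go (cs.length + 1) cs [] [] (Nat.lt_succ_self _)]
  rw [splitOn_eq_splitOnP]
  cases hx : List.splitOnP (· == '/') cs <;> simp

theorem sf_splitOn : ∀ (cs : List Char), ∀ l ∈ cs.splitOn '/', '/' ∉ l := by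
  intro cs
  induction cs with
  | nil => intro l hl; simp at hl; simp [hl]
  | cons c rest ih =>
    intro l hl
    rw [splitOn_eq_splitOnP, List.splitOnP_cons] at hl
    by_cases hc : c = '/'
    · rw [if_pos (by simp [hc])] at hl
      rcases List.mem_cons.mp hl with hl | hl
      · simp [hl]
      · exact ih l (by rw [splitOn_eq_splitOnP]; exact hl)
    · rw [if_neg (by simp [hc])] at hl
      rcases hsplit : List.splitOnP (· == '/') rest with _ | ⟨h0, t0⟩
      · exact absurd hsplit (List.splitOnP_ne_nil _ _)
      · rw [hsplit] at hl
        simp only [List.modifyHead_cons] at hl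
        rcases List.mem_cons.mp hl with hl | hl
        · subst hl
          intro hmem
          rcases List.mem_cons.mp hmem with h | h
          · exact hc h.symm
          · exact ih h0 (by rw [splitOn_eq_splitOnP, hsplit]; exact List.mem_cons_self) h
        · exact ih l (by rw [splitOn_eq_splitOnP, hsplit]; exact List.mem_cons_of_mem _ hl)

def joinSeg (ls : List (List Char)) : List Char := ['/'].intercalate ls

theorem joinSeg_inj {ls1 ls2 : List (List Char)} (h1 : ∀ l ∈ ls1, '/' ∉ l)
    (h2 : ∀ l ∈ ls2, '/' ∉ l) (n1 : ls1 ≠ []) (n2 : ls2 ≠ [])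
    (he : joinSeg ls1 = joinSeg ls2) : ls1 = ls2 := by
  have e1 := List.splitOn_intercalate (ls := ls1) '/' h1 n1
  have e2 := List.splitOn_intercalate (ls := ls2) '/' h2 n2
  rw [joinSeg, joinSeg] at he
  rw [← e1, he, e2]

theorem slash_mem_joinSeg {ls : List (List Char)} (h : 2 ≤ ls.length) : '/' ∈ joinSeg ls := by
  rcases ls with _ | ⟨a, _ | ⟨b, t⟩⟩
  · simp at h
  · simp at h
  · rw [joinSeg, List.intercalate, List.intersperse_cons₂]
    simp

theorem joinSeg_singleton (l : List Char) : joinSeg [l] = l := by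
  simp [joinSeg, List.intercalate]

theorem joinSeg_eq_root {ls : List (List Char)} (hsf : ∀ l ∈ ls, '/' ∉ l) (hne : ls ≠ [])
    (h : joinSeg ls = "__root__".toList) : ls = ["__root__".toList] := by
  rcases ls with _ | ⟨a, _ | ⟨b, t⟩⟩
  · exact absurd rfl hne
  · rw [joinSeg_singleton] at h; rw [h]
  · exfalso
    have : '/' ∈ "__root__".toList := h ▸ slash_mem_joinSeg (by simp)
    revert this; decide

-- ---------- key characterization layer ----------

def segs (p : String) : List (List Char) :=
  (PySem.Chars.replace p.toList ['\\'] ['/']).splitOn '/'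

def dsegs (p : String) : List (List Char) := (segs p).dropLast

theorem segs_ne_nil (p : String) : segs p ≠ [] := by
  rw [segs, splitOn_eq_splitOnP]; exact List.splitOnP_ne_nil _ _

theorem sf_segs (p : String) : ∀ l ∈ segs p, '/' ∉ l := fun l hl => sf_splitOn _ l hl

theorem sf_dsegs (p : String) : ∀ l ∈ dsegs p, '/' ∉ l :=
  fun l hl => sf_segs p l ((List.dropLast_sublist _).subset hl)

theorem sf_take_dsegs (p : String) (m : Nat) : ∀ l ∈ (dsegs p).take m, '/' ∉ l :=
  fun l hl => sf_dsegs p l (List.take_subset _ _ hl)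

theorem dsegs_len_pos {p : String} (h : (segs p).length ≠ 1) : 1 ≤ (dsegs p).length := by
  have h1 : 1 ≤ (segs p).length := List.length_pos_of_ne_nil (segs_ne_nil p)
  rw [dsegs, List.length_dropLast]
  omega

theorem take_ne_nil' {α : Type} {L : List α} {m : Nat} (h1 : 1 ≤ m) (h2 : 1 ≤ L.length) :
    L.take m ≠ [] := by
  apply List.ne_nil_of_length_pos
  rw [List.length_take]
  omega

theorem slice_neg_one {α : Type} (xs : List α) :
    PySem.List.slice xs none (some (-1)) = xs.dropLast := by
  rw [PySem.List.slice, List.dropLast_eq_take]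
  have : PySem.List.clampIdx xs.length (-1) = xs.length - 1 := by
    rw [PySem.List.clampIdx]
    split_ifs <;> omega
  simp [this]

theorem key_char (p : String) (d : Int) (hd : 1 ≤ d) :
    keyAtDepth p d = if (segs p).length = 1 then "__root__"
      else String.ofList (joinSeg ((dsegs p).take (min d.toNat (dsegs p).length))) := by
  have hsegs : (PySem.Str.split? (PySem.Str.replace p "\\" "/") "/").getD []
      = (segs p).map String.ofList := by
    rw [PySem.Str.split?, PySem.Str.replace]
    have hsep : ("/" : String).toList = ['/'] := rfl
    have hold : ("\\" : String).toList = ['\\'] := rfl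
    rw [hsep]
    rw [PySem.Chars.split?]
    simp only [List.isEmpty_cons]
    rw [String.toList_ofList, hold, pysplit]
    rfl
  rw [keyAtDepth, hsegs]
  have hlen : PySem.List.len ((segs p).map String.ofList) = ((segs p).length : Int) := by
    simp [PySem.List.len_eq]
  by_cases hp : (segs p).length = 1
  · rw [if_pos hp]
    have : (PySem.List.len ((segs p).map String.ofList) == 1) = true := by
      rw [hlen, hp]; rfl
    simp only [this, if_pos]
  · rw [if_neg hp]
    have hlp : 1 ≤ (segs p).length := List.length_pos_of_ne_nil (segs_ne_nil p)
    have hcond : (PySem.List.len ((segs p).map String.ofList) == 1) = false := by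
      rw [hlen]
      simp only [beq_eq_false_iff_ne, ne_eq]
      exact_mod_cast hp
    simp only [hcond, Bool.false_eq_true, reduceIte]
    rw [slice_neg_one]
    have hm : (List.map String.ofList (segs p)).dropLast = List.map String.ofList (dsegs p) := by
      rw [dsegs]
      exact List.map_dropLast.symm
    rw [hm]
    have hdne : (List.map String.ofList (dsegs p)) ≠ [] := by
      intro hnil
      have := dsegs_len_pos hp
      simp only [List.map_eq_nil_iff] at hnil
      rw [hnil] at this; simp at this
    rw [if_neg (by simpa using hdne)]
    have hL : PySem.List.len ((dsegs p).map String.ofList) = ((dsegs p).length : Int) := by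
      simp [PySem.List.len_eq]
    rw [hL]
    have htk : 0 ≤ min d ((dsegs p).length : Int) := by
      have := dsegs_len_pos hp
      omega
    rw [PySem.List.slice_to _ htk]
    have htoNat : (min d ((dsegs p).length : Int)).toNat = min d.toNat (dsegs p).length := by
      omega
    rw [htoNat, ← List.map_take]
    rw [PySem.Str.join]
    have : List.map String.toList (List.map String.ofList ((dsegs p).take (min d.toNat (dsegs p).length)))
        = (dsegs p).take (min d.toNat (dsegs p).length) := by
      rw [List.map_map]
      simp [Function.comp_def]
    rw [this]
    rfl

theorem key_master (p q : String) (a b c : Int) (h1b : 1 ≤ b) (hba : b ≤ a) (hbc : b ≤ c)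
    (h : keyAtDepth p a = keyAtDepth q c) : keyAtDepth p b = keyAtDepth q b := by
  have h1a : 1 ≤ a := le_trans h1b hba
  have h1c : 1 ≤ c := le_trans h1b hbc
  rw [key_char p a h1a, key_char q c h1c] at h
  rw [key_char p b h1b, key_char q b h1b]
  by_cases hp : (segs p).length = 1 <;> by_cases hq : (segs q).length = 1
  · rw [if_pos hp, if_pos hq]
  · -- p root, q not
    rw [if_pos hp] at h ⊢
    rw [if_neg hq] at h ⊢
    have hLq := dsegs_len_pos hq
    have hroot : joinSeg ((dsegs q).take (min c.toNat (dsegs q).length)) = "__root__".toList := by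
      simpa using congrArg String.toList h.symm
    have hT := joinSeg_eq_root (sf_take_dsegs q _) (take_ne_nil' (by omega) hLq) hroot
    have hlen1 : min c.toNat (dsegs q).length = 1 := by
      have := congrArg List.length hT
      rw [List.length_take] at this
      simp at this
      omega
    have hlenb : min b.toNat (dsegs q).length = 1 := by omega
    rw [hlenb, ← hlen1, hT, joinSeg_singleton, String.ofList_toList]
  · -- q root, p not
    rw [if_pos hq] at h ⊢
    rw [if_neg hp] at h ⊢
    have hLp := dsegs_len_pos hp
    have hroot : joinSeg ((dsegs p).take (min a.toNat (dsegs p).length)) = "__root__".toList := by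
      simpa using congrArg String.toList h
    have hT := joinSeg_eq_root (sf_take_dsegs p _) (take_ne_nil' (by omega) hLp) hroot
    have hlen1 : min a.toNat (dsegs p).length = 1 := by
      have := congrArg List.length hT
      rw [List.length_take] at this
      simp at this
      omega
    have hlenb : min b.toNat (dsegs p).length = 1 := by omega
    rw [hlenb, ← hlen1, hT, joinSeg_singleton, String.ofList_toList]
  · -- both non-root
    rw [if_neg hp] at h ⊢
    rw [if_neg hq] at h ⊢
    have hLp := dsegs_len_pos hp
    have hLq := dsegs_len_pos hq
    have hTT : (dsegs p).take (min a.toNat (dsegs p).length)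
        = (dsegs q).take (min c.toNat (dsegs q).length) := by
      apply joinSeg_inj (sf_take_dsegs p _) (sf_take_dsegs q _)
        (take_ne_nil' (by omega) hLp) (take_ne_nil' (by omega) hLq)
      have := congrArg String.toList h
      rwa [String.toList_ofList, String.toList_ofList] at this
    have hbb := congrArg (List.take b.toNat) hTT
    rw [List.take_take, List.take_take] at hbb
    have e1 : min b.toNat (min a.toNat (dsegs p).length) = min b.toNat (dsegs p).length := by omega
    have e2 : min b.toNat (min c.toNat (dsegs q).length) = min b.toNat (dsegs q).length := by omega
    rw [e1, e2] at hbb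
    rw [hbb]

-- ---------- grouping-fold (canonical form) layer ----------

def canonKV (P : List (String × List (String × String))) :
    List (String × List (List (String × String))) :=
  (PySem.List.dedup (P.map Prod.fst)).map
    (fun k => (k, (P.filter (fun q => q.1 == k)).map Prod.snd))

theorem canon_items (P : List (String × List (String × String))) :
    (P.foldl (fun d p => d.modify p.1 [] (· ++ [p.2])) PySem.Dict.empty).items = canonKV P := by
  have hnd : ((P.foldl (fun d p => d.modify p.1 [] (· ++ [p.2])) PySem.Dict.empty)).keys.Nodup := by
    exact PySem.Dict.nodup_keys_foldl_modify_key P Prod.fst [] (fun d p v => v ++ [p.2])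
      PySem.Dict.empty (by simp [PySem.Dict.keys_empty])
  rw [PySem.Dict.items_eq_map_keys _ hnd []]
  rw [PySem.Dict.keys_foldl_modify_key P Prod.fst [] (fun d p v => v ++ [p.2]) PySem.Dict.empty]
  have hupd : PySem.Set.update (PySem.Dict.empty : PySem.Dict String (List (List (String × String)))).keys (P.map Prod.fst)
      = PySem.List.dedup (P.map Prod.fst) := rfl
  rw [hupd, canonKV]
  apply List.map_congr_left
  intro k hk
  have := PySem.Dict.getD_foldl_modify_append P PySem.Dict.empty k
  rw [PySem.Dict.getD_empty] at this
  rw [this]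
  simp

def canonF (K : List (String × String) → String) (fs : List (List (String × String))) :
    List (String × List (List (String × String))) :=
  canonKV (fs.map (fun f => (K f, f)))

theorem canonF_items (K : List (String × String) → String) (fs : List (List (String × String))) :
    (fs.foldl (fun d f => d.modify (K f) [] (· ++ [f])) PySem.Dict.empty).items = canonF K fs := by
  rw [canonF, ← canon_items, List.foldl_map]

theorem canonKV_keys (P : List (String × List (String × String))) :
    (canonKV P).map Prod.fst = PySem.List.dedup (P.map Prod.fst) := by
  rw [canonKV, List.map_map]
  simp [Function.comp_def]

theorem canonKV_nodup (P : List (String × List (String × String))) :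
    ((canonKV P).map Prod.fst).Nodup := by
  rw [canonKV_keys]
  rw [PySem.List.dedup_eq_ofList]
  exact PySem.Set.nodup_ofList _

theorem mem_canonKV {P : List (String × List (String × String))}
    {e : String × List (List (String × String))} (he : e ∈ canonKV P) :
    e.1 ∈ P.map Prod.fst ∧ e.2 = (P.filter (fun q => q.1 == e.1)).map Prod.snd := by
  rw [canonKV] at he
  rcases List.mem_map.mp he with ⟨k, hk, hke⟩
  have h1 : e.1 = k := by rw [← hke]
  have h2 : e.2 = (P.filter (fun q => q.1 == k)).map Prod.snd := by rw [← hke]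
  subst h1
  exact ⟨(PySem.List.mem_dedup _ _).mp hk, by rw [h2]⟩

theorem canonKV_snd_ne_nil {P : List (String × List (String × String))}
    {e : String × List (List (String × String))} (he : e ∈ canonKV P) : e.2 ≠ [] := by
  rcases mem_canonKV he with ⟨h1, h2⟩
  rcases List.mem_map.mp h1 with ⟨q, hq, hqe⟩
  rw [h2]
  intro hnil
  rw [List.map_eq_nil_iff, List.filter_eq_nil_iff] at hnil
  exact hnil q hq (by simp [hqe])

theorem mem_canonF_consistent {K : List (String × String) → String}
    {fs : List (List (String × String))} {e : String × List (List (String × String))}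
    (he : e ∈ canonF K fs) : ∀ f ∈ e.2, K f = e.1 ∧ f ∈ fs := by
  intro f hf
  rcases mem_canonKV he with ⟨_, h2⟩
  rw [h2] at hf
  rcases List.mem_map.mp hf with ⟨q, hq, hqf⟩
  rcases List.mem_filter.mp hq with ⟨hqmem, hqkey⟩
  rcases List.mem_map.mp hqmem with ⟨g, hg, hgq⟩
  have : q = (K g, g) := hgq.symm
  subst this
  have hfg : f = g := by rw [← hqf]
  subst hfg
  refine ⟨?_, hg⟩
  simpa using hqkey

theorem canonF_snd_mem {K : List (String × String) → String}
    {fs : List (List (String × String))} {e : String × List (List (String × String))}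
    (he : e ∈ canonF K fs) : ∀ f ∈ e.2, f ∈ fs :=
  fun f hf => (mem_canonF_consistent he f hf).2

-- a constant-key pair list groups to a single entry
theorem update_const (k : String) :
    ∀ (fs : List (List (String × String))) (s : List String), k ∈ s →
    PySem.Set.update s (fs.map (fun _ => k)) = s := by
  intro fs
  induction fs with
  | nil => intro s _; rfl
  | cons f rest ih =>
    intro s hk
    show PySem.Set.update (PySem.Set.add s k) (rest.map (fun _ => k)) = s
    have : PySem.Set.add s k = s := by
      rw [PySem.Set.add, if_pos (by rw [PySem.Set.contains]; simpa using hk)]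
    rw [this]
    exact ih s hk

theorem canon_const (k : String) (fs : List (List (String × String))) (hne : fs ≠ []) :
    canonKV (fs.map (fun f => (k, f))) = [(k, fs)] := by
  rcases fs with _ | ⟨f0, rest⟩
  · exact absurd rfl hne
  · rw [canonKV]
    have hfst : ((f0 :: rest).map (fun f => (k, f))).map Prod.fst
        = (f0 :: rest).map (fun _ => k) := by
      rw [List.map_map]; rfl
    rw [hfst]
    have hded : PySem.List.dedup ((f0 :: rest).map (fun _ => k)) = [k] := by
      rw [PySem.List.dedup_eq_ofList, PySem.Set.ofList]
      show PySem.Set.update (PySem.Set.add PySem.Set.empty k) (rest.map (fun _ => k)) = [k]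
      have hadd : PySem.Set.add PySem.Set.empty k = [k] := rfl
      rw [hadd]
      exact update_const k rest [k] (by simp)
    rw [hded]
    simp [List.filter_map, Function.comp_def]

-- oversized-membership: with unique keys, `e.1 ∈ (filter c).map fst ↔ c e`
theorem mem_filter_map_fst {α : Type} {l : List (String × α)}
    (hnd : (l.map Prod.fst).Nodup) {e : String × α} (he : e ∈ l) (c : String × α → Bool) :
    e.1 ∈ (l.filter c).map Prod.fst ↔ c e = true := by
  constructor
  · intro h
    rcases List.mem_map.mp h with ⟨e', he', hfst⟩
    rcases List.mem_filter.mp he' with ⟨hmem, hc⟩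
    have : e' = e := List.inj_on_of_nodup_map hnd hmem he hfst
    rwa [this] at hc
  · intro h
    exact List.mem_map.mpr ⟨e, List.mem_filter.mpr ⟨he, h⟩, rfl⟩

-- dict.modify composition / extension
theorem modify_modify (d : PySem.Dict String (List (List (String × String)))) (k : String)
    (g h : List (List (String × String)) → List (List (String × String))) :
    (d.modify k [] g).modify k [] h = d.modify k [] (fun v => h (g v)) := by
  rw [PySem.Dict.modify, PySem.Dict.modify, PySem.Dict.modify,
    PySem.Dict.getD_insert_self, PySem.Dict.insert_insert_self]

theorem modify_extend (k : String) :
    ∀ (xs : List (List (String × String))) (x : List (String × String))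
      (d : PySem.Dict String (List (List (String × String)))),
    ((x :: xs).foldl (fun d f => d.modify k [] (· ++ [f])) d) = d.modify k [] (· ++ (x :: xs)) := by
  intro xs
  induction xs with
  | nil => intro x d; rfl
  | cons y ys ih =>
    intro x d
    show ((y :: ys).foldl (fun d f => d.modify k [] (· ++ [f])) (d.modify k [] (· ++ [x])))
      = d.modify k [] (· ++ (x :: y :: ys))
    rw [ih y (d.modify k [] (· ++ [x])), modify_modify]
    congr 1
    funext v
    simp

-- dedup and canonKV distribute over disjoint appends
theorem update_append_left (ys : List String) :
    ∀ (t s : List String), (∀ y ∈ ys, y ∉ s) →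
    PySem.Set.update (s ++ t) ys = s ++ PySem.Set.update t ys := by
  induction ys with
  | nil => intro t s _; rfl
  | cons y rest ih =>
    intro t s hdis
    show PySem.Set.update (PySem.Set.add (s ++ t) y) rest
      = s ++ PySem.Set.update (PySem.Set.add t y) rest
    have hys : y ∉ s := hdis y List.mem_cons_self
    have hcontains : PySem.Set.contains (s ++ t) y = PySem.Set.contains t y := by
      rw [PySem.Set.contains, PySem.Set.contains, List.contains_append]
      have : s.contains y = false := by simpa using hys
      rw [this, Bool.false_or]
    rw [PySem.Set.add, PySem.Set.add, hcontains]
    by_cases hc : PySem.Set.contains t y = true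
    · rw [if_pos hc, if_pos hc]
      exact ih t s (fun z hz => hdis z (List.mem_cons_of_mem _ hz))
    · rw [if_neg hc, if_neg hc, List.append_assoc]
      exact ih (t ++ [y]) s (fun z hz => hdis z (List.mem_cons_of_mem _ hz))

theorem dedup_append (xs ys : List String) (h : ∀ y ∈ ys, y ∉ xs) :
    PySem.List.dedup (xs ++ ys) = PySem.List.dedup xs ++ PySem.List.dedup ys := by
  rw [PySem.List.dedup_eq_ofList, PySem.List.dedup_eq_ofList, PySem.List.dedup_eq_ofList]
  rw [PySem.Set.ofList, List.foldl_append]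
  show PySem.Set.update (PySem.Set.ofList xs) ys = _
  have hdis : ∀ y ∈ ys, y ∉ PySem.Set.ofList xs := by
    intro y hy hmem
    exact h y hy ((PySem.Set.mem_ofList _ _).mp hmem)
  have := update_append_left ys [] (PySem.Set.ofList xs) hdis
  rw [List.append_nil] at this
  rw [this]
  rfl

theorem canon_append (P Q : List (String × List (String × String)))
    (hdis : ∀ a ∈ P.map Prod.fst, a ∉ Q.map Prod.fst) :
    canonKV (P ++ Q) = canonKV P ++ canonKV Q := by
  rw [canonKV, canonKV, canonKV, List.map_append]
  rw [dedup_append _ _ (fun y hy hmem => hdis y hmem hy)]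
  rw [List.map_append]
  congr 1
  · apply List.map_congr_left
    intro k hk
    have hkP : k ∈ P.map Prod.fst := (PySem.List.mem_dedup _ _).mp hk
    rw [List.filter_append]
    have hQ : Q.filter (fun q => q.1 == k) = [] := by
      rw [List.filter_eq_nil_iff]
      intro q hq hqk
      exact hdis k hkP (List.mem_map.mpr ⟨q, hq, by simpa using hqk⟩)
    rw [hQ, List.append_nil]
  · apply List.map_congr_left
    intro k hk
    have hkQ : k ∈ Q.map Prod.fst := (PySem.List.mem_dedup _ _).mp hk
    rw [List.filter_append]
    have hP : P.filter (fun q => q.1 == k) = [] := by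
      rw [List.filter_eq_nil_iff]
      intro q hq hqk
      exact hdis q.1 (List.mem_map.mpr ⟨q, hq, rfl⟩) (by rw [show q.1 = k by simpa using hqk]; exact hkQ)
    rw [hP, List.nil_append]

theorem canon_flatMap {β : Type} (l : List β) (h : β → List (String × List (String × String)))
    (hdis : l.Pairwise (fun e e' => ∀ a ∈ (h e).map Prod.fst, a ∉ (h e').map Prod.fst)) :
    canonKV (l.flatMap h) = l.flatMap (fun e => canonKV (h e)) := by
  induction l with
  | nil => rfl
  | cons e rest ih =>
    rw [List.flatMap_cons, List.flatMap_cons]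
    rcases List.pairwise_cons.mp hdis with ⟨hhead, htail⟩
    rw [canon_append]
    · rw [ih htail]
    · intro a ha hmem
      rw [List.map_flatMap] at hmem
      rcases List.mem_flatMap.mp hmem with ⟨e', he', ha'⟩
      exact hhead e' he' a ha ha'

-- ---------- assembly layer ----------

def KD (d : Int) (f : List (String × String)) : String := keyAtDepth (pyPath f) d

def condE (t : Int) (e : String × List (List (String × String))) : Bool :=
  e.1 != "__root__" && decide (PySem.List.len e.2 > t)

def emitE (os : List String) (dep : Int) (e : String × List (List (String × String))) :
    List (String × List (String × String)) :=
  if e.1 ∈ os then e.2.map (fun f => (KD (dep + 1) f, f)) else e.2.map (fun f => (e.1, f))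

def stepAt (t dep : Int) (e : String × List (List (String × String))) :
    List (String × List (List (String × String))) :=
  if condE t e then canonF (KD (dep + 1)) e.2 else [e]

theorem key_clash {f g : List (String × String)} {df dg b : Int} (h1b : 1 ≤ b)
    (hdf : b ≤ df) (hdg : b ≤ dg) (heq : KD df f = KD dg g) : KD b f = KD b g :=
  key_master (pyPath f) (pyPath g) df b dg h1b hdf hdg heq

theorem sep_keys {b : Int} (h1b : 1 ≤ b) {k k' : String} (hkk : k ≠ k')
    {F G : List (List (String × String))} {S S' : List String}
    (hF : ∀ f ∈ F, KD b f = k) (hG : ∀ g ∈ G, KD b g = k')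
    (hS : ∀ a ∈ S, ∃ f ∈ F, ∃ da : Int, b ≤ da ∧ a = KD da f)
    (hS' : ∀ a ∈ S', ∃ g ∈ G, ∃ da : Int, b ≤ da ∧ a = KD da g) :
    ∀ a ∈ S, a ∉ S' := by
  intro a ha ha'
  obtain ⟨f, hf, da, hda, hav⟩ := hS a ha
  obtain ⟨g, hg, dg, hdg, hav'⟩ := hS' a ha'
  have : KD b f = KD b g := key_clash h1b hda hdg (by rw [← hav, ← hav'])
  rw [hF f hf, hG g hg] at this
  exact hkk this

set_option maxHeartbeats 600000 in
theorem emit_key_shape {os : List String} {dep lv : Int} {e : String × List (List (String × String))}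
    (hlv : lv ≤ dep + 1) (hcons : ∀ f ∈ e.2, KD lv f = e.1) (hne : e.2 ≠ []) :
    ∀ a ∈ (emitE os dep e).map Prod.fst, ∃ f ∈ e.2, ∃ da : Int, lv ≤ da ∧ a = KD da f := by
  intro a ha
  rw [emitE] at ha
  by_cases hin : e.1 ∈ os
  · rw [if_pos hin] at ha
    rcases List.mem_map.mp ha with ⟨p, hp, hpa⟩
    rcases List.mem_map.mp hp with ⟨f, hf, hfp⟩
    refine ⟨f, hf, dep + 1, hlv, ?_⟩
    rw [← hpa, ← hfp]
  · rw [if_neg hin] at ha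
    rcases List.exists_mem_of_ne_nil _ hne with ⟨f, hf⟩
    refine ⟨f, hf, lv, le_refl _, ?_⟩
    rw [hcons f hf]
    rcases List.mem_map.mp ha with ⟨p, hp, hpa⟩
    rcases List.mem_map.mp hp with ⟨f0, hf0, hfp⟩
    rw [← hpa, ← hfp]

theorem step_key_shape {t : Int} {e x : String × List (List (String × String))}
    (hx : x ∈ stepAt t 1 e) (hcons : ∀ f ∈ e.2, KD 1 f = e.1) (hne : e.2 ≠ []) :
    (∀ f ∈ x.2, f ∈ e.2) ∧ x.2 ≠ [] ∧ (∃ lv : Int, 1 ≤ lv ∧ lv ≤ 2 ∧ ∀ f ∈ x.2, KD lv f = x.1) := by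
  rw [stepAt] at hx
  by_cases hc : condE t e = true
  · rw [if_pos hc] at hx
    refine ⟨canonF_snd_mem hx, canonKV_snd_ne_nil hx, 1 + 1, by norm_num, by norm_num, ?_⟩
    intro f hf
    exact (mem_canonF_consistent hx f hf).1
  · rw [if_neg hc] at hx
    have hxe : x = e := by simpa using hx
    subst hxe
    exact ⟨fun f hf => hf, hne, 1, le_refl _, by norm_num, hcons⟩

theorem pairwise_disj_stage1 (t : Int) (os : List String)
    {G : List (String × List (List (String × String)))}
    (hnd : (G.map Prod.fst).Nodup)
    (hcons : ∀ e ∈ G, ∀ f ∈ e.2, KD 1 f = e.1) (hne : ∀ e ∈ G, e.2 ≠ []) :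
    G.Pairwise (fun e e' => ∀ a ∈ (emitE os 1 e).map Prod.fst, a ∉ (emitE os 1 e').map Prod.fst) := by
  have hp : G.Pairwise (fun e e' => e.1 ≠ e'.1) := List.pairwise_map.mp hnd
  refine hp.imp_of_mem ?_
  intro e e' he he' hne1
  exact sep_keys (le_refl (1 : Int)) hne1 (hcons e he) (hcons e' he')
    (emit_key_shape (by norm_num) (hcons e he) (hne e he))
    (emit_key_shape (by norm_num) (hcons e' he') (hne e' he'))

theorem pairwise_disj_stage2 (t : Int) (os : List String)
    {G : List (String × List (List (String × String)))}
    (hnd : (G.map Prod.fst).Nodup)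
    (hcons : ∀ e ∈ G, ∀ f ∈ e.2, KD 1 f = e.1) (hne : ∀ e ∈ G, e.2 ≠ []) :
    (G.flatMap (stepAt t 1)).Pairwise
      (fun x x' => ∀ a ∈ (emitE os (1 + 1) x).map Prod.fst, a ∉ (emitE os (1 + 1) x').map Prod.fst) := by
  rw [List.flatMap_def]
  rw [List.pairwise_flatten]
  constructor
  · intro bl hbl
    rcases List.mem_map.mp hbl with ⟨e, he, hbe⟩
    subst hbe
    rw [stepAt]
    by_cases hc : condE t e = true
    · rw [if_pos hc]
      have hndb : ((canonF (KD (1 + 1)) e.2).map Prod.fst).Nodup := canonKV_nodup _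
      have hpb : (canonF (KD (1 + 1)) e.2).Pairwise (fun x x' => x.1 ≠ x'.1) :=
        List.pairwise_map.mp hndb
      refine hpb.imp_of_mem ?_
      intro x x' hx hx' hxx
      refine sep_keys (b := 1 + 1) (by norm_num) hxx
        (fun f hf => (mem_canonF_consistent hx f hf).1)
        (fun f hf => (mem_canonF_consistent hx' f hf).1)
        (emit_key_shape (by norm_num) (fun f hf => (mem_canonF_consistent hx f hf).1)
          (canonKV_snd_ne_nil hx))
        (emit_key_shape (by norm_num) (fun f hf => (mem_canonF_consistent hx' f hf).1)
          (canonKV_snd_ne_nil hx'))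
    · rw [if_neg hc]
      simp
  · have hp : G.Pairwise (fun e e' => e.1 ≠ e'.1) := List.pairwise_map.mp hnd
    have hG : G.Pairwise (fun e e' => ∀ x ∈ stepAt t 1 e, ∀ y ∈ stepAt t 1 e',
        ∀ a ∈ (emitE os (1 + 1) x).map Prod.fst, a ∉ (emitE os (1 + 1) y).map Prod.fst) := by
      refine hp.imp_of_mem ?_
      intro e e' he he' hne1 x hx y hy
      rcases step_key_shape hx (hcons e he) (hne e he) with ⟨hsub, hxne, lv, h1lv, hlv2, hcx⟩
      rcases step_key_shape hy (hcons e' he') (hne e' he') with ⟨hsub', hyne, lv', h1lv', hlv2', hcy⟩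
      refine sep_keys (le_refl (1 : Int)) hne1 (hcons e he) (hcons e' he') ?_ ?_
      · intro a ha
        rcases emit_key_shape (os := os) (by omega) hcx hxne a ha with ⟨f, hf, da, hda, hav⟩
        exact ⟨f, hsub f hf, da, by omega, hav⟩
      · intro a ha
        rcases emit_key_shape (os := os) (by omega) hcy hyne a ha with ⟨g, hg, da, hda, hav⟩
        exact ⟨g, hsub' g hg, da, by omega, hav⟩
    exact hG.map _ (fun _ _ h => h)

theorem canon_emit {t : Int} (os : List String) (dep : Int)
    {G : List (String × List (List (String × String)))}
    (hnd : (G.map Prod.fst).Nodup)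
    (hos : os = (G.filter (condE t)).map Prod.fst)
    {e : String × List (List (String × String))} (he : e ∈ G) (hne : e.2 ≠ []) :
    canonKV (emitE os dep e) = stepAt t dep e := by
  have hmem : (e.1 ∈ os) ↔ condE t e = true := by
    rw [hos]; exact mem_filter_map_fst hnd he _
  rw [emitE, stepAt]
  by_cases hc : condE t e = true
  · rw [if_pos (hmem.mpr hc), if_pos hc]; rfl
  · rw [if_neg (fun h => hc (hmem.mp h)), if_neg hc]
    rw [canon_const e.1 e.2 hne]

theorem stage_items (os : List String) (dep : Int)
    (G : List (String × List (List (String × String))))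
    (hne : ∀ e ∈ G, e.2 ≠ []) :
    (G.foldl (fun d kfs =>
        if kfs.1 ∈ os then
          kfs.2.foldl (fun d f => d.modify (KD (dep + 1) f) [] (· ++ [f])) d
        else d.modify kfs.1 [] (· ++ kfs.2)) PySem.Dict.empty).items
      = canonKV (G.flatMap (emitE os dep)) := by
  rw [← canon_items (G.flatMap (emitE os dep)), List.foldl_flatMap]
  congr 1
  apply PySem.List.foldl_congr_mem
  intro d e he
  by_cases hin : e.1 ∈ os
  · rw [if_pos hin, emitE, if_pos hin, List.foldl_map]
  · rw [if_neg hin, emitE, if_neg hin, List.foldl_map]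
    rcases hfs : e.2 with _ | ⟨x, xs⟩
    · exact absurd hfs (hne e he)
    · exact (modify_extend e.1 xs x d).symm

-- unfolding helpers for the two fueled recursions
theorem gfweLoop_zero (t : Int) (depth : Int) (g : PySem.Dict String (List (List (String × String)))) :
    gfweLoop t 0 depth g = g := rfl

theorem gfweLoop_succ (t : Int) (fuel : Nat) (depth : Int)
    (g : PySem.Dict String (List (List (String × String)))) :
    gfweLoop t (fuel + 1) depth g =
      (if ((g.items.filter
          (fun kfs => kfs.1 != "__root__" && decide (PySem.List.len kfs.2 > t))).map Prod.fst) == [] then g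
      else
        gfweLoop t fuel (depth + 1)
          (g.items.foldl (fun d kfs =>
            if kfs.1 ∈ ((g.items.filter
                (fun kfs => kfs.1 != "__root__" && decide (PySem.List.len kfs.2 > t))).map Prod.fst) then
              kfs.2.foldl (fun d f => d.modify (keyAtDepth (pyPath f) (depth + 1)) [] (· ++ [f])) d
            else d.modify kfs.1 [] (· ++ kfs.2)) PySem.Dict.empty)) := rfl

theorem gfweSplit_succ (t : Int) (fuel : Nat) (key : String) (depth : Int)
    (files : List (List (String × String))) :
    gfweSplit t (fuel + 1) key depth files =
      (if key == "__root__" || decide (PySem.List.len files ≤ t) || decide (depth ≥ 3) then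
        [(key, files)]
      else
        (gfweRegroup files (depth + 1)).items.foldl
          (fun out kg => out ++ gfweSplit t fuel kg.1 (depth + 1) kg.2) []) := rfl

theorem stop_eq_not_cond (t : Int) (e : String × List (List (String × String))) (d : Int)
    (hd : decide (d ≥ (3 : Int)) = false) :
    (e.1 == "__root__" || decide (PySem.List.len e.2 ≤ t) || decide (d ≥ 3)) = !condE t e := by
  rw [hd, Bool.or_false, condE]
  have hdec : decide (PySem.List.len e.2 ≤ t) = !decide (PySem.List.len e.2 > t) := by
    by_cases h : PySem.List.len e.2 ≤ t
    · rw [decide_eq_true h, decide_eq_false (by omega)]; rfl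
    · rw [decide_eq_false h, decide_eq_true (by omega)]; rfl
  rw [hdec, Bool.not_and]
  have hbne : (!(e.1 != "__root__")) = (e.1 == "__root__") := by
    simp [bne]
  rw [hbne]

theorem regroup_items (files : List (List (String × String))) (d : Int) :
    (gfweRegroup files d).items = canonF (KD d) files := by
  rw [gfweRegroup]
  exact canonF_items (KD d) files

theorem split_stepAt (t : Int) (e : String × List (List (String × String))) :
    gfweSplit t 3 e.1 1 e.2 = (stepAt t 1 e).flatMap (stepAt t (1 + 1)) := by
  rw [show (3 : Nat) = 2 + 1 from rfl, gfweSplit_succ,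
    stop_eq_not_cond t e 1 (by decide)]
  by_cases hc : condE t e = true
  · rw [if_neg (by simp [hc])]
    rw [stepAt, if_pos hc]
    rw [regroup_items]
    rw [PySem.List.foldl_append_eq_flatMap, List.nil_append]
    apply List.flatMap_congr
    intro kg _
    rw [show (2 : Nat) = 1 + 1 from rfl, gfweSplit_succ,
      stop_eq_not_cond t (kg.1, kg.2) (1 + 1) (by decide)]
    rw [stepAt]
    by_cases hkg : condE t (kg.1, kg.2) = true
    · rw [if_neg (by simp [hkg]), if_pos (by simpa using hkg)]
      rw [regroup_items]
      rw [PySem.List.foldl_append_eq_flatMap, List.nil_append]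
      have : ∀ x ∈ canonF (KD (1 + 1 + 1)) kg.2,
          gfweSplit t 1 x.1 (1 + 1 + 1) x.2 = [x] := by
        intro x _
        rw [show (1 : Nat) = 0 + 1 from rfl, gfweSplit_succ]
        rw [if_pos (by simp)]
      rw [List.flatMap_congr this, List.flatMap_singleton']
    · rw [if_pos (by simpa using hkg), if_neg (by simpa using hkg)]
  · rw [if_pos (by simp [hc])]
    rw [stepAt, if_neg hc]
    rw [List.flatMap_cons, List.flatMap_nil, List.append_nil]
    rw [stepAt, if_neg hc]

-- ---------- main equivalence ----------

theorem rebuild_items (L : List (String × List (List (String × String))))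
    (hnd : (L.map Prod.fst).Nodup) :
    (L.foldl (fun d kg => d.insert kg.1 kg.2) PySem.Dict.empty).items = L := by
  rw [PySem.Dict.items_foldl_insert_fresh L Prod.fst Prod.snd PySem.Dict.empty
    (fun a _ => PySem.Dict.contains_empty a.1) hnd]
  show ([] : List (String × List (List (String × String)))) ++ _ = _
  simp

theorem gfwe_eq (all_files : List (List (String × String))) (t : Int) :
    group_files_with_expansion_py all_files t = group_files_with_expansion_py_alt all_files t := by
  by_cases hnil : all_files = []
  · subst hnil; rfl
  · have hbeq : (all_files == []) = false := by simpa using hnil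
    rw [group_files_with_expansion_py, group_files_with_expansion_py_alt]
    rw [if_neg (by simp [hbeq]), if_neg (by simp [hbeq])]
    have hcondeq : (fun (kfs : String × List (List (String × String))) =>
        kfs.1 != "__root__" && decide (PySem.List.len kfs.2 > t)) = condE t := rfl
    -- facts about the depth-1 grouping
    have hG1 : (all_files.foldl
        (fun d f => d.modify (keyAtDepth (pyPath f) 1) [] (· ++ [f])) PySem.Dict.empty).items
        = canonF (KD 1) all_files := canonF_items (KD 1) all_files
    have hnd1 : ((canonF (KD 1) all_files).map Prod.fst).Nodup := canonKV_nodup _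
    have hcons1 : ∀ e ∈ canonF (KD 1) all_files, ∀ f ∈ e.2, KD 1 f = e.1 :=
      fun e he f hf => (mem_canonF_consistent he f hf).1
    have hne1 : ∀ e ∈ canonF (KD 1) all_files, e.2 ≠ [] :=
      fun e he => canonKV_snd_ne_nil he
    -- B's flat list
    have hBflat : (gfweRegroup all_files 1).items.foldl
        (fun out kg => out ++ gfweSplit t 3 kg.1 1 kg.2) []
        = (canonF (KD 1) all_files).flatMap
            (fun e => (stepAt t 1 e).flatMap (stepAt t (1 + 1))) := by
      rw [regroup_items, PySem.List.foldl_append_eq_flatMap, List.nil_append]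
      exact List.flatMap_congr (fun e _ => split_stepAt t e)
    rw [hBflat]
    -- unfold the first loop iteration
    rw [show (2 : Nat) = 1 + 1 from rfl, gfweLoop_succ, hG1, hcondeq]
    by_cases hos1 : ((canonF (KD 1) all_files).filter (condE t)).map Prod.fst = []
    · rw [if_pos (by simp only [beq_iff_eq]; exact hos1)]
      have hall : ∀ e ∈ canonF (KD 1) all_files, condE t e = false := by
        rw [List.map_eq_nil_iff, List.filter_eq_nil_iff] at hos1
        intro e he
        exact eq_false_of_ne_true (hos1 e he)
      have hflat1 : (canonF (KD 1) all_files).flatMap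
          (fun e => (stepAt t 1 e).flatMap (stepAt t (1 + 1)))
          = canonF (KD 1) all_files := by
        have hpt : ∀ e ∈ canonF (KD 1) all_files,
            (stepAt t 1 e).flatMap (stepAt t (1 + 1)) = [e] := by
          intro e he
          rw [stepAt, if_neg (by simp [hall e he])]
          rw [List.flatMap_cons, List.flatMap_nil, List.append_nil]
          rw [stepAt, if_neg (by simp [hall e he])]
        rw [List.flatMap_congr hpt, List.flatMap_singleton']
      rw [hflat1, rebuild_items _ hnd1]
      exact hG1
    · rw [if_neg (by simp only [beq_iff_eq]; exact hos1)]
      -- first expansion stage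
      have hD2 : ((canonF (KD 1) all_files).foldl (fun d kfs =>
          if kfs.1 ∈ ((canonF (KD 1) all_files).filter (condE t)).map Prod.fst then
            kfs.2.foldl (fun d f => d.modify (keyAtDepth (pyPath f) (1 + 1)) [] (· ++ [f])) d
          else d.modify kfs.1 [] (· ++ kfs.2)) PySem.Dict.empty).items
          = canonKV ((canonF (KD 1) all_files).flatMap
              (emitE (((canonF (KD 1) all_files).filter (condE t)).map Prod.fst) 1)) :=
        stage_items _ 1 _ hne1
      have hcanon2 : canonKV ((canonF (KD 1) all_files).flatMap
          (emitE (((canonF (KD 1) all_files).filter (condE t)).map Prod.fst) 1))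
          = (canonF (KD 1) all_files).flatMap (stepAt t 1) := by
        rw [canon_flatMap _ _ (pairwise_disj_stage1 t _ hnd1 hcons1 hne1)]
        exact List.flatMap_congr (fun e he => canon_emit _ 1 hnd1 rfl he (hne1 e he))
      have hnd2 : (((canonF (KD 1) all_files).flatMap (stepAt t 1)).map Prod.fst).Nodup := by
        rw [← hcanon2]; exact canonKV_nodup _
      have hcons2x : ∀ x ∈ (canonF (KD 1) all_files).flatMap (stepAt t 1), x.2 ≠ [] := by
        intro x hx
        rcases List.mem_flatMap.mp hx with ⟨e, he, hxe⟩
        exact (step_key_shape hxe (hcons1 e he) (hne1 e he)).2.1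
      -- unfold the second loop iteration
      rw [show (1 : Nat) = 0 + 1 from rfl, gfweLoop_succ, hcondeq, hD2, hcanon2]
      by_cases hos2 : (((canonF (KD 1) all_files).flatMap (stepAt t 1)).filter (condE t)).map Prod.fst = []
      · rw [if_pos (by simp only [beq_iff_eq]; exact hos2)]
        have hall2 : ∀ x ∈ (canonF (KD 1) all_files).flatMap (stepAt t 1), condE t x = false := by
          rw [List.map_eq_nil_iff, List.filter_eq_nil_iff] at hos2
          intro x hx
          exact eq_false_of_ne_true (hos2 x hx)
        have hflat2 : (canonF (KD 1) all_files).flatMap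
            (fun e => (stepAt t 1 e).flatMap (stepAt t (1 + 1)))
            = (canonF (KD 1) all_files).flatMap (stepAt t 1) := by
          apply List.flatMap_congr
          intro e he
          have hpt : ∀ x ∈ stepAt t 1 e, stepAt t (1 + 1) x = [x] := by
            intro x hx
            rw [stepAt, if_neg (by simp [hall2 x (List.mem_flatMap.mpr ⟨e, he, hx⟩)])]
          rw [List.flatMap_congr hpt, List.flatMap_singleton']
        rw [hflat2, rebuild_items _ hnd2]
        exact hD2.trans hcanon2
      · rw [if_neg (by simp only [beq_iff_eq]; exact hos2)]
        -- second expansion stage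
        have hD3 : (((canonF (KD 1) all_files).flatMap (stepAt t 1)).foldl (fun d kfs =>
            if kfs.1 ∈ (((canonF (KD 1) all_files).flatMap (stepAt t 1)).filter (condE t)).map Prod.fst then
              kfs.2.foldl (fun d f => d.modify (keyAtDepth (pyPath f) (1 + 1 + 1)) [] (· ++ [f])) d
            else d.modify kfs.1 [] (· ++ kfs.2)) PySem.Dict.empty).items
            = canonKV (((canonF (KD 1) all_files).flatMap (stepAt t 1)).flatMap
                (emitE ((((canonF (KD 1) all_files).flatMap (stepAt t 1)).filter (condE t)).map Prod.fst) (1 + 1))) :=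
          stage_items _ (1 + 1) _ hcons2x
        have hcanon3 : canonKV (((canonF (KD 1) all_files).flatMap (stepAt t 1)).flatMap
            (emitE ((((canonF (KD 1) all_files).flatMap (stepAt t 1)).filter (condE t)).map Prod.fst) (1 + 1)))
            = ((canonF (KD 1) all_files).flatMap (stepAt t 1)).flatMap (stepAt t (1 + 1)) := by
          rw [canon_flatMap _ _ (pairwise_disj_stage2 t _ hnd1 hcons1 hne1)]
          exact List.flatMap_congr (fun x hx => canon_emit _ (1 + 1) hnd2 rfl hx (hcons2x x hx))
        rw [gfweLoop_zero, hD3, hcanon3, List.flatMap_assoc]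
        have hndflat : (((canonF (KD 1) all_files).flatMap
            (fun e => (stepAt t 1 e).flatMap (stepAt t (1 + 1)))).map Prod.fst).Nodup := by
          rw [← List.flatMap_assoc, ← hcanon3]
          exact canonKV_nodup _
        rw [rebuild_items _ hndflat]

-- ===== VERDICT (by name: the statement is the Claim_ definition above) =====
theorem group_files_with_expansion_py_spec : Claim_equal_group_files_with_expansion_py := by
  intro all_files threshold _hdom _hpre
  exact gfwe_eq all_files threshold
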